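-- pv_equiv track=rewrite | github.com/mbuesch/cms | cms/util.py | findNot
-- ===== SOURCE A (Python) =====
-- def findNot(string, template, idx): #@nocy
-- #cdef _Bool findNot(str string, str template, int64_t idx): #@cy
-- #@cy	cdef int64_t slen
--
-- 	if idx >= 0:
-- 		slen = len(string)
-- 		while idx < slen:
-- 			if string[idx] not in template:
-- 				return idx
-- 			idx += 1
-- 	return -1
-- ===== SOURCE B (Python) =====
-- def findNot(string, template, idx):
--     if idx < 0:
--         return -1
--     rest = string[idx:]
--     stripped = rest.lstrip(template)
--     if not stripped:
--         return -1
--     return idx + (len(rest) - len(stripped))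
-- ===== Notes on version B (the rewrite author's own statement) =====
-- stated objective: idiomatic
-- what changed: Replaces the explicit index-by-index while-scan with a slice plus str.lstrip(template) and length arithmetic to locate the first character not in template.
import Mathlib
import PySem

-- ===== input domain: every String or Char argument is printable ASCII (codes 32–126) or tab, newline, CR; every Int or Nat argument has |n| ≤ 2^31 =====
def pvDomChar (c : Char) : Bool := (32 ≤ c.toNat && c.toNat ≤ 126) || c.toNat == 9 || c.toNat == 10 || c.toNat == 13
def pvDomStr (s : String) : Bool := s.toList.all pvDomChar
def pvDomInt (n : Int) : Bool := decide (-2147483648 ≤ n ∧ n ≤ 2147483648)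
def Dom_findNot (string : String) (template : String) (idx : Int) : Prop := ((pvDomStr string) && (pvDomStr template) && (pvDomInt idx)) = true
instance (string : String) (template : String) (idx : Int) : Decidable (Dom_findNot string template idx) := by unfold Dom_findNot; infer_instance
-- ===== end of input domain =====

-- B replaces A's explicit while-scan with a slice + lstrip(template) and length arithmetic (idiomatic; same cost).


-- ===== PORT A =====
-- the while loop: while idx < slen: if string[idx] not in template: return idx; idx += 1
def findNotGo (s t : List Char) (slen : Int) (idx : Int) : Int :=
  if _h : idx < slen then
    match PySem.List.pyGet? s idx with
    | some c => if t.contains c then findNotGo s t slen (idx + 1) else idx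
    | none => -1   -- unreachable: 0 ≤ idx < slen = len s
  else -1
termination_by (slen - idx).toNat
decreasing_by omega

def findNot (string : String) (template : String) (idx : Int) : Int :=
  if idx ≥ 0 then
    findNotGo string.toList template.toList (string.toList.length : Int) idx
  else -1

-- ===== PORT B =====
def findNot_alt (string : String) (template : String) (idx : Int) : Int :=
  if idx < 0 then -1
  else
    let rest := PySem.List.slice string.toList (some idx) none   -- string[idx:]
    -- rest.lstrip(template): drop leading chars that are members of template (exact hand port)
    let stripped := rest.dropWhile (fun c => template.toList.contains c)
    if stripped = [] then -1
    else idx + ((rest.length - stripped.length : Nat) : Int)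

-- ===== PRECONDITION & SPEC =====
def Spec_findNot (string : String) (template : String) (idx : Int) (out : Int) : Prop := out = findNot_alt string template idx
instance (string : String) (template : String) (idx : Int) (out : Int) : Decidable (Spec_findNot string template idx out) := by unfold Spec_findNot; infer_instance

-- ===== CLAIM (what is proved, stated in full; the proofs are below) =====
def Claim_equal_findNot : Prop := ∀ (string : String) (template : String) (idx : Int), Dom_findNot string template idx → Spec_findNot string template idx (findNot string template idx)

-- ===== LEMMAS AND PROOFS =====
lemma findNotGo_eq (s t : List Char) :
    ∀ (m k : Nat), s.length - k = m →
      findNotGo s t (s.length : Int) (k : Int) =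
        (if (s.drop k).dropWhile (fun c => t.contains c) = [] then -1
         else (k : Int) + (((s.drop k).length - ((s.drop k).dropWhile (fun c => t.contains c)).length : Nat) : Int)) := by
  intro m
  induction m with
  | zero =>
      intro k hk
      have hlen : s.length ≤ k := by omega
      have hdrop : s.drop k = [] := List.drop_eq_nil_of_le hlen
      rw [findNotGo, hdrop]
      simp
      omega
  | succ n ih =>
      intro k hk
      have hklt : k < s.length := by omega
      have hdrop : s.drop k = s[k] :: s.drop (k + 1) := List.drop_eq_getElem_cons hklt
      have hget : PySem.List.pyGet? s (k : Int) = some s[k] := by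
        simp [PySem.List.pyGet?_natCast, List.getElem?_eq_getElem hklt]
      rw [findNotGo]
      rw [dif_pos (show (k : Int) < (s.length : Int) by exact_mod_cast hklt), hget]
      have hmatch : (match some s[k] with
          | some c => if t.contains c = true then findNotGo s t (↑s.length) (↑k + 1) else (↑k : Int)
          | none => -1) =
          if t.contains s[k] = true then findNotGo s t (↑s.length) (↑k + 1) else (↑k : Int) := rfl
      rw [hmatch]
      by_cases hc : t.contains s[k]
      · -- char is in template: loop continues
        have hcast : (k : Int) + 1 = ((k + 1 : Nat) : Int) := by push_cast; ring
        rw [if_pos hc, hcast, ih (k + 1) (by omega)]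
        rw [hdrop]
        simp only [List.dropWhile_cons, hc, if_pos]
        have hle := List.length_dropWhile_le (p := fun c => t.contains c) (l := s.drop (k + 1))
        by_cases hnil : (s.drop (k + 1)).dropWhile (fun c => t.contains c) = []
        · rw [if_pos hnil, if_pos hnil]
        · rw [if_neg hnil, if_neg hnil]
          simp only [List.length_cons]
          omega
      · -- first char not in template: A returns k here
        rw [if_neg hc, hdrop]
        simp only [List.dropWhile_cons, hc]
        simp [hklt]

-- ===== VERDICT (by name: the statement is the Claim_ definition above) =====
theorem findNot_spec : Claim_equal_findNot := by
  intro s t idx _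
  unfold Spec_findNot findNot findNot_alt
  by_cases h : 0 ≤ idx
  · rw [if_pos h, if_neg (by omega)]
    have hk : idx = ((idx.toNat : Nat) : Int) := by omega
    rw [hk, PySem.List.slice_from_natCast]
    exact findNotGo_eq s.toList t.toList (s.toList.length - idx.toNat) idx.toNat rfl
  · rw [if_neg h, if_pos (by omega)]
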